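-- pv_equiv track=rewrite | github.com/NelsonGomesNeto/ProgramC | PAA/2practice/1021SuperSales.py | solve
-- ===== SOURCE A (Python) =====
-- def knapsack(dp, obj, i, weight):
--     if (i == len(obj)):
--         return(0)
--
--     if (dp[i][weight] == -1):
--         dp[i][weight] = knapsack(dp, obj, i + 1, weight)
--         if (obj[i][1] <= weight):
--             dp[i][weight] = max(dp[i][weight], knapsack(dp, obj, i + 1, weight - obj[i][1]) + obj[i][0])
--
--     return(dp[i][weight])
--
-- def solve(obj, people):
--     peopleDP = [-1] * 31
--     total = 0
--     for i in people:
--         if (peopleDP[i] == -1):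
--             ksDP = [[-1] * (i + 1) for j in range(len(obj) + 1)]
--             peopleDP[i] = knapsack(ksDP, obj, 0, i)
--         total += peopleDP[i]
--     return(total)
-- ===== SOURCE B (Python) =====
-- def solve(obj, people):
--     peopleDP = [-1] * 31
--     total = 0
--     for i in people:
--         if peopleDP[i] == -1:
--             # bottom-up 0/1-knapsack tabulation instead of memoized recursion
--             dp = [0] * (i + 1)
--             for value, weight in obj:
--                 dp = [max(dp[w], dp[w - weight] + value) if weight <= w else dp[w]
--                       for w in range(i + 1)]
--             peopleDP[i] = dp[i]
--         total += peopleDP[i]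
--     return total
-- ===== Notes on version B (the rewrite author's own statement) =====
-- stated objective: simpler
-- what changed: Replaces the memoized top-down recursion over (item index, remaining weight) with an iterative bottom-up 0/1-knapsack tabulation that rebuilds a one-dimensional capacity table per item; the per-budget cache and outer loop are kept.
-- outside the precondition, e.g. on solve([], [-1]): A returns 0, B raises IndexError; on solve([(5, -1)], [0]): A returns 5, B raises IndexError
import Mathlib
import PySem

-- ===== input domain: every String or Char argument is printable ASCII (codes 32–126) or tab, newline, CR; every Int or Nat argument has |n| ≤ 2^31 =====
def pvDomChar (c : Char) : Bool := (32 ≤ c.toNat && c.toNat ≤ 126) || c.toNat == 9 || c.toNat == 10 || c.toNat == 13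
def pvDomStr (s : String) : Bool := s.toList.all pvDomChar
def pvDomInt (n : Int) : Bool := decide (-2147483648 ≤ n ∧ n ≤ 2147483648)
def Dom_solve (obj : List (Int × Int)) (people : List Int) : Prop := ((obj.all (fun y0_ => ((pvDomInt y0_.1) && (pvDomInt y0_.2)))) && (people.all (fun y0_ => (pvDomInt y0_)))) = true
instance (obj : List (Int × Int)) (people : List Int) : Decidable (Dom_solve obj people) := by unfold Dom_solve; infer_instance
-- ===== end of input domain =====

-- B replaces A's memoized top-down knapsack recursion by an iterative bottom-up tabulation
-- (a fresh capacity table rebuilt per item); objective: simpler.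

-- ===== PORT A =====
-- dp[i][weight] read/write; indices are in range and weight ≥ 0 on every input admitted
-- by Pre_solve, where these total forms are exact (Python raises outside Pre_).
def tgetA (dp : List (List Int)) (i wn : Nat) : Int := (dp.getD i []).getD wn (-1)
def tsetA (dp : List (List Int)) (i wn : Nat) (r : Int) : List (List Int) :=
  dp.set i ((dp.getD i []).set wn r)

-- knapsack(dp, obj, i, weight): the recursion stops at i == len(obj); fuel = len(obj) - i at
-- every call, so the fuel-0 case is exactly Python's 'i == len(obj)' base case.
-- Python stores dp[i][weight] = first recursion's value before the second recursion (kept here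
-- as dp1') and finally returns the entry it just stored (returned here directly, same value).
def knapA (obj : List (Int × Int)) : Nat → Nat → Int → List (List Int) → Int × List (List Int)
  | 0, _, _, dp => (0, dp)
  | fuel+1, i, w, dp =>
    if tgetA dp i w.toNat = -1 then
      let r1 := (knapA obj fuel (i+1) w dp).1
      let dp1' := tsetA (knapA obj fuel (i+1) w dp).2 i w.toNat r1
      let p := obj.getD i (0, 0)
      if p.2 ≤ w then
        let r2 := (knapA obj fuel (i+1) (w - p.2) dp1').1
        let r := max r1 (r2 + p.1)
        (r, tsetA (knapA obj fuel (i+1) (w - p.2) dp1').2 i w.toNat r)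
      else (r1, dp1')
    else (tgetA dp i w.toNat, dp)

def solve (obj : List (Int × Int)) (people : List Int) : Int :=
  (people.foldl (fun (st : List Int × Int) i =>
      if st.1.getD i.toNat (-1) = -1 then
        let ksDP := List.replicate (obj.length + 1) (List.replicate (i + 1).toNat (-1))
        let v := (knapA obj obj.length 0 i ksDP).1
        (st.1.set i.toNat v, st.2 + v)
      else (st.1, st.2 + st.1.getD i.toNat (-1)))
    (List.replicate 31 (-1), 0)).2

-- ===== PORT B =====
-- Same outer loop and peopleDP cache as Source B; the per-budget optimum is computed by
-- rebuilding dp = [... for w in range(i+1)] once per item (bottom-up tabulation).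
-- List indices are in range and nonnegative on every input admitted by Pre_solve.
def solve_alt (obj : List (Int × Int)) (people : List Int) : Int :=
  (people.foldl (fun (st : List Int × Int) i =>
      if st.1.getD i.toNat (-1) = -1 then
        let dp := obj.foldl (fun dp p =>
            (List.range (i + 1).toNat).map (fun (w : Nat) =>
              if p.2 ≤ (w : Int) then
                max (dp.getD w 0) (dp.getD ((w : Int) - p.2).toNat 0 + p.1)
              else dp.getD w 0))
          (List.replicate (i + 1).toNat 0)
        let v := dp.getD i.toNat 0
        (st.1.set i.toNat v, st.2 + v)
      else (st.1, st.2 + st.1.getD i.toNat (-1)))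
    (List.replicate 31 (-1), 0)).2

-- ===== PRECONDITION & SPEC =====
-- Pre_ excludes budgets outside 0..30 (peopleDP[i] raises IndexError for i>30 or i<-31; for
-- negative budgets A only returns on empty obj, where its empty-table value is an accident of
-- negative-index wraparound and B itself raises IndexError) and negative item weights (both
-- programs index past the end of the dp row; A raises on almost all such inputs and B on all).
def Pre_solve (obj : List (Int × Int)) (people : List Int) : Prop :=
  (∀ p ∈ obj, 0 ≤ p.2) ∧ (∀ i ∈ people, 0 ≤ i ∧ i ≤ 30)
instance (obj : List (Int × Int)) (people : List Int) : Decidable (Pre_solve obj people) := by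
  unfold Pre_solve; infer_instance

def pvWitness_solve : (List (Int × Int)) × List Int := ([(3, 2), (4, 3), (5, 4)], [5, 2, 5, 0])

def Spec_solve (obj : List (Int × Int)) (people : List Int) (out : Int) : Prop :=
  out = solve_alt obj people
instance (obj : List (Int × Int)) (people : List Int) (out : Int) : Decidable (Spec_solve obj people out) := by
  unfold Spec_solve; infer_instance

-- ===== CLAIM (what is proved, stated in full; the proofs are below) =====
def Claim_equal_solve : Prop := ∀ (obj : List (Int × Int)) (people : List Int),
  Dom_solve obj people → Pre_solve obj people → Spec_solve obj people (solve obj people)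

-- ===== LEMMAS AND PROOFS =====

-- Reference function: the plain 0/1-knapsack recursion both ports are proved to compute.
def ks : List (Int × Int) → Int → Int
  | [], _ => 0
  | p :: rest, w => if p.2 ≤ w then max (ks rest w) (ks rest (w - p.2) + p.1) else ks rest w

-- appending an item acts on ks like prepending it (weights nonnegative)
lemma ks_append (q : Int × Int) (hq : 0 ≤ q.2) :
    ∀ (P : List (Int × Int)) (w : Int), (∀ r ∈ P, 0 ≤ r.2) →
      ks (P ++ [q]) w = if q.2 ≤ w then max (ks P w) (ks P (w - q.2) + q.1) else ks P w := by
  intro P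
  induction P with
  | nil => intro w _; simp [ks]
  | cons x P ih =>
    intro w hP
    have hx : 0 ≤ x.2 := hP x List.mem_cons_self
    have hP' : ∀ r ∈ P, 0 ≤ r.2 := fun r hr => hP r (List.mem_cons_of_mem _ hr)
    simp only [List.cons_append, ks, ih _ hP']
    rw [show w - x.2 - q.2 = w - q.2 - x.2 by ring]
    split_ifs <;> omega

lemma getD_set {α : Type} (l : List α) (n : Nat) (v : α) (m : Nat) (d : α) :
    (l.set n v).getD m d = if n = m ∧ m < l.length then v else l.getD m d := by
  simp only [List.getD, List.getElem?_set]
  by_cases he : n = m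
  · subst he
    by_cases hl : n < l.length
    · simp [hl]
    · simp [hl]
  · simp [he]

lemma tsetA_len (dp : List (List Int)) (i wn : Nat) (r : Int) :
    (tsetA dp i wn r).length = dp.length := by
  simp [tsetA]

lemma tsetA_row_len (dp : List (List Int)) (i wn : Nat) (r : Int) (j : Nat) :
    ((tsetA dp i wn r).getD j []).length = ((dp.getD j []).length) := by
  simp only [tsetA, getD_set]
  split_ifs with h
  · obtain ⟨rfl, _⟩ := h
    simp
  · rfl

lemma tgetA_tsetA_ne_row (dp : List (List Int)) (i wn : Nat) (r : Int) (j wm : Nat)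
    (h : j ≠ i) : tgetA (tsetA dp i wn r) j wm = tgetA dp j wm := by
  simp only [tgetA, tsetA]
  rw [getD_set, if_neg (by tauto)]

lemma tgetA_tsetA_ne_col (dp : List (List Int)) (i wn : Nat) (r : Int) (wm : Nat)
    (h : wm ≠ wn) : tgetA (tsetA dp i wn r) i wm = tgetA dp i wm := by
  simp only [tgetA, tsetA]
  rw [getD_set]
  split_ifs with h1
  · rw [getD_set, if_neg (by tauto)]
  · rfl

lemma tgetA_tsetA_self (dp : List (List Int)) (i wn : Nat) (r : Int) :
    tgetA (tsetA dp i wn r) i wn =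
      if i < dp.length ∧ wn < (dp.getD i []).length then r else tgetA dp i wn := by
  simp only [tgetA, tsetA]
  rw [getD_set]
  by_cases h1 : i < dp.length
  · rw [if_pos ⟨rfl, h1⟩, getD_set]
    by_cases h2 : wn < (dp.getD i []).length
    · rw [if_pos ⟨rfl, h2⟩, if_pos ⟨h1, h2⟩]
    · rw [if_neg (by tauto), if_neg (by tauto)]
  · rw [if_neg (by tauto), if_neg (by tauto)]

-- one-step unfolding of knapA, let-free
lemma knapA_succ (obj : List (Int × Int)) (fuel i : Nat) (w : Int) (dp : List (List Int)) :
    knapA obj (fuel+1) i w dp =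
      if tgetA dp i w.toNat = -1 then
        if (obj.getD i (0, 0)).2 ≤ w then
          (max (knapA obj fuel (i+1) w dp).1
               ((knapA obj fuel (i+1) (w - (obj.getD i (0, 0)).2)
                  (tsetA (knapA obj fuel (i+1) w dp).2 i w.toNat (knapA obj fuel (i+1) w dp).1)).1
                + (obj.getD i (0, 0)).1),
           tsetA (knapA obj fuel (i+1) (w - (obj.getD i (0, 0)).2)
                  (tsetA (knapA obj fuel (i+1) w dp).2 i w.toNat (knapA obj fuel (i+1) w dp).1)).2
                 i w.toNat
                 (max (knapA obj fuel (i+1) w dp).1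
                      ((knapA obj fuel (i+1) (w - (obj.getD i (0, 0)).2)
                         (tsetA (knapA obj fuel (i+1) w dp).2 i w.toNat (knapA obj fuel (i+1) w dp).1)).1
                       + (obj.getD i (0, 0)).1)))
        else ((knapA obj fuel (i+1) w dp).1,
              tsetA (knapA obj fuel (i+1) w dp).2 i w.toNat (knapA obj fuel (i+1) w dp).1)
      else (tgetA dp i w.toNat, dp) := rfl

-- knapA only rewrites existing cells: the table's shape never changes
lemma knapA_shape (obj : List (Int × Int)) :
    ∀ fuel i (w : Int) dp,
      (knapA obj fuel i w dp).2.length = dp.length ∧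
      ∀ j, (((knapA obj fuel i w dp).2.getD j []).length) = ((dp.getD j []).length) := by
  intro fuel
  induction fuel with
  | zero => intro i w dp; simp [knapA]
  | succ fuel ih =>
    intro i w dp
    rw [knapA_succ]
    split_ifs with hc hg
    · constructor
      · simp only [tsetA_len]
        exact ((ih (i+1) (w - (obj.getD i (0,0)).2) _).1).trans
          ((tsetA_len _ _ _ _).trans ((ih (i+1) w dp).1))
      · intro j
        simp only [tsetA_row_len]
        exact ((ih (i+1) (w - (obj.getD i (0,0)).2) _).2 j).trans
          ((tsetA_row_len _ _ _ _ _).trans ((ih (i+1) w dp).2 j))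
    · constructor
      · exact (tsetA_len _ _ _ _).trans ((ih (i+1) w dp).1)
      · intro j
        exact (tsetA_row_len _ _ _ _ _).trans ((ih (i+1) w dp).2 j)
    · exact ⟨rfl, fun _ => rfl⟩

-- table invariant: every memo entry in a row ≥ k is either unfilled (-1) or the ks value
def InvFrom (obj : List (Int × Int)) (k : Nat) (dp : List (List Int)) : Prop :=
  ∀ j wn, k ≤ j → tgetA dp j wn = -1 ∨ tgetA dp j wn = ks (obj.drop j) (wn : Int)

lemma knapA_spec (obj : List (Int × Int)) :
    ∀ fuel i (w : Int) dp, obj.length = i + fuel → 0 ≤ w → InvFrom obj i dp →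
      (knapA obj fuel i w dp).1 = ks (obj.drop i) w ∧
      InvFrom obj i (knapA obj fuel i w dp).2 ∧
      (∀ j wm, j < i → tgetA (knapA obj fuel i w dp).2 j wm = tgetA dp j wm) := by
  intro fuel
  induction fuel with
  | zero =>
    intro i w dp hlen hw hInv
    refine ⟨?_, ?_, ?_⟩
    · rw [List.drop_of_length_le (by omega)]
      simp [knapA, ks]
    · simpa [knapA] using hInv
    · intro j wm _; simp [knapA]
  | succ fuel ih =>
    intro i w dp hlen hw hInv
    have hi : i < obj.length := by omega
    have hdrop : obj.drop i = obj[i] :: obj.drop (i+1) := List.drop_eq_getElem_cons hi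
    have hgetD : obj.getD i (0, 0) = obj[i] := List.getD_eq_getElem obj (0,0) hi
    have hwnat : ((w.toNat : Int)) = w := Int.toNat_of_nonneg hw
    rw [knapA_succ]
    by_cases hc : tgetA dp i w.toNat = -1
    · rw [if_pos hc]
      have hInv1 : InvFrom obj (i+1) dp := fun j wn hj => hInv j wn (by omega)
      obtain ⟨h1v, h1inv, h1pre⟩ := ih (i+1) w dp (by omega) hw hInv1
      have hs1 := knapA_shape obj fuel (i+1) w dp
      set A1 := knapA obj fuel (i+1) w dp with hA1
      set dp1' := tsetA A1.2 i w.toNat A1.1 with hdp1'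
      have hdp1'inv : InvFrom obj (i+1) dp1' := by
        intro j wn hj
        rw [hdp1', tgetA_tsetA_ne_row _ _ _ _ _ _ (by omega)]
        exact h1inv j wn (by omega)
      by_cases hg : (obj.getD i (0, 0)).2 ≤ w
      · rw [if_pos hg]
        have hw2 : 0 ≤ w - (obj.getD i (0, 0)).2 := by omega
        obtain ⟨h2v, h2inv, h2pre⟩ :=
          ih (i+1) (w - (obj.getD i (0, 0)).2) dp1' (by omega) hw2 hdp1'inv
        have hs2 := knapA_shape obj fuel (i+1) (w - (obj.getD i (0, 0)).2) dp1'
        set A2 := knapA obj fuel (i+1) (w - (obj.getD i (0, 0)).2) dp1' with hA2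
        have hval : max A1.1 (A2.1 + (obj.getD i (0, 0)).1) = ks (obj.drop i) w := by
          rw [hdrop, ks, hgetD] at *
          rw [if_pos hg, h1v, h2v]
        refine ⟨hval, ?_, ?_⟩
        · intro j wn hj
          rcases Nat.lt_or_ge i j with hji | hji
          · rw [tgetA_tsetA_ne_row _ _ _ _ _ _ (by omega)]
            exact h2inv j wn (by omega)
          · have hje : j = i := by omega
            subst hje
            by_cases hwm : wn = w.toNat
            · subst hwm
              rw [tgetA_tsetA_self]
              split_ifs with hcnd
              · right
                rw [hwnat, hval]
              · left
                rw [h2pre j w.toNat (by omega), hdp1', tgetA_tsetA_self]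
                have hcnd' : ¬(j < A1.2.length ∧ w.toNat < (A1.2.getD j []).length) := by
                  rw [hs2.1, hs2.2 j, hdp1', tsetA_len, tsetA_row_len] at hcnd
                  exact hcnd
                rw [if_neg hcnd', h1pre j w.toNat (by omega)]
                exact hc
            · rw [tgetA_tsetA_ne_col _ _ _ _ _ hwm, h2pre j wn (by omega), hdp1',
                  tgetA_tsetA_ne_col _ _ _ _ _ hwm, h1pre j wn (by omega)]
              exact hInv j wn le_rfl
        · intro j wm hj
          rw [tgetA_tsetA_ne_row _ _ _ _ _ _ (by omega), h2pre j wm (by omega), hdp1',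
              tgetA_tsetA_ne_row _ _ _ _ _ _ (by omega), h1pre j wm (by omega)]
      · rw [if_neg hg]
        have hval : A1.1 = ks (obj.drop i) w := by
          rw [hdrop, ks, hgetD] at *
          rw [if_neg hg, h1v]
        refine ⟨hval, ?_, ?_⟩
        · intro j wn hj
          rcases Nat.lt_or_ge i j with hji | hji
          · rw [hdp1', tgetA_tsetA_ne_row _ _ _ _ _ _ (by omega)]
            exact h1inv j wn (by omega)
          · have hje : j = i := by omega
            subst hje
            by_cases hwm : wn = w.toNat
            · subst hwm
              rw [hdp1', tgetA_tsetA_self]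
              split_ifs with hcnd
              · right
                rw [hwnat, hval]
              · left
                rw [h1pre j w.toNat (by omega)]
                exact hc
            · rw [hdp1', tgetA_tsetA_ne_col _ _ _ _ _ hwm, h1pre j wn (by omega)]
              exact hInv j wn le_rfl
        · intro j wm hj
          rw [hdp1', tgetA_tsetA_ne_row _ _ _ _ _ _ (by omega), h1pre j wm (by omega)]
    · rw [if_neg hc]
      refine ⟨?_, ?_, ?_⟩
      · rcases hInv i w.toNat le_rfl with h | h
        · exact absurd h hc
        · rw [h, hwnat]
      · exact hInv
      · intro j wm _; rfl

-- the per-budget value computed by port A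
lemma solveA_budget (obj : List (Int × Int)) (i : Int) (hi : 0 ≤ i) :
    (knapA obj obj.length 0 i
      (List.replicate (obj.length + 1) (List.replicate (i + 1).toNat (-1)))).1 = ks obj i := by
  have hInv : InvFrom obj 0 (List.replicate (obj.length + 1) (List.replicate (i + 1).toNat (-1))) := by
    intro j wn _
    left
    simp only [tgetA]
    rcases Nat.lt_or_ge j (obj.length + 1) with h | h
    · rw [List.getD_replicate _ h]
      rcases Nat.lt_or_ge wn (i + 1).toNat with h2 | h2
      · rw [List.getD_replicate _ h2]
      · rw [List.getD_eq_default _ _ (by simpa using h2)]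
    · rw [List.getD_eq_default (List.replicate (obj.length + 1)
            (List.replicate (i + 1).toNat (-1))) [] (by simpa using h)]
      rfl
  have := knapA_spec obj obj.length 0 i _ (by omega) hi hInv
  simpa using this.1

-- B's per-item rebuilt table holds ks of the prefix processed so far
lemma foldB_inv (i : Int) :
    ∀ (rest P : List (Int × Int)), (∀ p ∈ P, 0 ≤ p.2) → (∀ p ∈ rest, 0 ≤ p.2) →
      List.foldl (fun dp p =>
          (List.range (i + 1).toNat).map (fun (w : Nat) =>
            if p.2 ≤ (w : Int) then
              max (dp.getD w 0) (dp.getD ((w : Int) - p.2).toNat 0 + p.1)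
            else dp.getD w 0))
        ((List.range (i + 1).toNat).map (fun (w : Nat) => ks P (w : Int))) rest
      = (List.range (i + 1).toNat).map (fun (w : Nat) => ks (P ++ rest) (w : Int)) := by
  intro rest
  induction rest with
  | nil => intro P _ _; simp
  | cons q rest ih =>
    intro P hP hr
    have hq : 0 ≤ q.2 := hr q List.mem_cons_self
    have hr' : ∀ p ∈ rest, 0 ≤ p.2 := fun p hp => hr p (List.mem_cons_of_mem _ hp)
    have hP' : ∀ p ∈ P ++ [q], 0 ≤ p.2 := by
      intro p hp
      rcases List.mem_append.1 hp with h | h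
      · exact hP p h
      · rw [List.mem_singleton.1 h]; exact hq
    have hstep :
        (List.range (i + 1).toNat).map (fun (w : Nat) =>
            if q.2 ≤ (w : Int) then
              max (((List.range (i + 1).toNat).map (fun (w : Nat) => ks P (w : Int))).getD w 0)
                (((List.range (i + 1).toNat).map (fun (w : Nat) => ks P (w : Int))).getD
                    ((w : Int) - q.2).toNat 0 + q.1)
            else ((List.range (i + 1).toNat).map (fun (w : Nat) => ks P (w : Int))).getD w 0)
        = (List.range (i + 1).toNat).map (fun (w : Nat) => ks (P ++ [q]) (w : Int)) := by
      apply List.map_congr_left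
      intro w hw
      have hwN : w < (i + 1).toNat := List.mem_range.1 hw
      rw [ks_append q hq P _ hP]
      rw [PySem.List.getD_map_range (fun (w : Nat) => ks P (w : Int)) _ w 0 hwN]
      split_ifs with hcond
      · have h2 : ((w : Int) - q.2).toNat < (i + 1).toNat := by omega
        rw [PySem.List.getD_map_range _ _ _ 0 h2]
        have h3 : ((((w : Int) - q.2).toNat : Nat) : Int) = (w : Int) - q.2 := by omega
        rw [h3]
      · rfl
    rw [List.foldl_cons]
    rw [hstep, ih (P ++ [q]) hP' hr']
    rw [List.append_assoc]
    rfl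

-- the per-budget value computed by port B
lemma solveB_budget (obj : List (Int × Int)) (hW : ∀ p ∈ obj, 0 ≤ p.2) (i : Int) (hi : 0 ≤ i) :
    (obj.foldl (fun dp p =>
        (List.range (i + 1).toNat).map (fun (w : Nat) =>
          if p.2 ≤ (w : Int) then
            max (dp.getD w 0) (dp.getD ((w : Int) - p.2).toNat 0 + p.1)
          else dp.getD w 0))
      (List.replicate (i + 1).toNat 0)).getD i.toNat 0 = ks obj i := by
  have h0 : List.replicate (i + 1).toNat (0 : Int)
      = (List.range (i + 1).toNat).map (fun (w : Nat) => ks [] (w : Int)) := by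
    simp [ks, List.map_const']
  rw [h0, foldB_inv i obj [] (by simp) hW, List.nil_append]
  have hN : i.toNat < (i + 1).toNat := by omega
  rw [PySem.List.getD_map_range _ _ _ 0 hN]
  rw [Int.toNat_of_nonneg hi]

-- ===== VERDICT (by name: the statement is the Claim_ definition above) =====
theorem solve_spec : Claim_equal_solve := by
  intro obj people _ hpre
  obtain ⟨hW, hP⟩ := hpre
  unfold Spec_solve solve solve_alt
  refine congrArg Prod.snd (PySem.List.foldl_congr_mem _ _ _ _ ?_)
  intro st i hi
  have hi0 : 0 ≤ i := (hP i hi).1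
  by_cases hc : st.1.getD i.toNat (-1) = -1
  · simp only [if_pos hc]
    rw [solveA_budget obj i hi0, solveB_budget obj hW i hi0]
  · simp only [if_neg hc]
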